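-- pv_equiv track=rewrite | github.com/Sunner4nwpu/RA-UWML-AU-Pytorch | preprocess/Disfa/gene_dataset.py | find_subjects
-- ===== SOURCE A (Python) =====
-- def find_subjects(images_folders, subjects):
--     our_images_folders = []
--
--     for subject in subjects:
--         for images_folder in images_folders:
--             if len(images_folder.split('.')) == 1:
--                 if subject in images_folder:
--                     our_images_folders.append(images_folder)
--
--     return our_images_folders
-- ===== SOURCE B (Python) =====
-- def find_subjects(images_folders, subjects):
--     distinct = list(dict.fromkeys(subjects))
--     matches = {}
--     for folder in images_folders:
--         if '.' in folder:
--             continue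
--         for subject in distinct:
--             if subject in folder:
--                 matches.setdefault(subject, []).append(folder)
--     out = []
--     for subject in subjects:
--         out.extend(matches.get(subject, []))
--     return out
-- ===== Notes on version B (the rewrite author's own statement) =====
-- stated objective: faster
-- what changed: Inverts the traversal: one pass over images_folders (with the '.'-test done once per folder instead of once per subject-folder pair) builds a dict mapping each distinct subject to its matching folders, then the output is assembled by walking the original subjects list and extending with matches.get(subject, []).
import Mathlib
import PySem

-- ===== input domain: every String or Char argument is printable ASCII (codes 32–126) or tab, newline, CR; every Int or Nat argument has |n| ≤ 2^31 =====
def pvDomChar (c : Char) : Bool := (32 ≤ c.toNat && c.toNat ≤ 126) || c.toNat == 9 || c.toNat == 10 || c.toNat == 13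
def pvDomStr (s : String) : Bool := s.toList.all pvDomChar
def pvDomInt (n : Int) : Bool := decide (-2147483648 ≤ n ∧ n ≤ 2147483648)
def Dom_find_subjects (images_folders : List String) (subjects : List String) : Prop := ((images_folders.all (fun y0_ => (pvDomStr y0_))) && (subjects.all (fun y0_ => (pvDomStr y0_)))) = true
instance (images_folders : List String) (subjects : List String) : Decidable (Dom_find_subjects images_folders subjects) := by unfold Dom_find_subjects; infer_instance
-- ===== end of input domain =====

-- B inverts the traversal: a single pass over images_folders builds a dict from each distinct
-- subject to its matching folders, then the output is assembled by walking the subjects list.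


-- ===== PORT A =====
def find_subjects (images_folders : List String) (subjects : List String) : List String :=
  subjects.foldl (fun acc subject =>
    images_folders.foldl (fun acc images_folder =>
      if (PySem.Chars.splitOn images_folder.toList ['.']).length == 1 then
        if PySem.Str.isIn subject images_folder then acc ++ [images_folder] else acc
      else acc) acc) []

-- ===== PORT B =====
def find_subjects_alt (images_folders : List String) (subjects : List String) : List String :=
  let distinct := PySem.List.dedup subjects
  let idx : PySem.Dict String (List String) :=
    images_folders.foldl (fun d folder =>
      if PySem.Str.isIn "." folder then d
      else distinct.foldl (fun d subject =>
        if PySem.Str.isIn subject folder then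
          d.insert subject ((d.getD subject []) ++ [folder])   -- setdefault(subject, []).append(folder)
        else d) d) PySem.Dict.empty
  subjects.foldl (fun out subject => out ++ idx.getD subject []) []

-- ===== PRECONDITION & SPEC =====
def Spec_find_subjects (images_folders : List String) (subjects : List String) (out : List String) : Prop := out = find_subjects_alt images_folders subjects
instance (images_folders : List String) (subjects : List String) (out : List String) : Decidable (Spec_find_subjects images_folders subjects out) := by unfold Spec_find_subjects; infer_instance

-- ===== CLAIM (what is proved, stated in full; the proofs are below) =====
def Claim_equal_find_subjects : Prop := ∀ (images_folders : List String) (subjects : List String), Dom_find_subjects images_folders subjects → Spec_find_subjects images_folders subjects (find_subjects images_folders subjects)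

-- ===== LEMMAS AND PROOFS =====

-- splitOn.go always yields at least acc.length + 1 pieces
theorem go_length_ge (sep : List Char) (fuel : Nat) (l cur : List Char) (acc : List (List Char)) :
    acc.length + 1 ≤ (PySem.Chars.splitOn.go sep fuel l cur acc).length := by
  induction fuel generalizing l cur acc with
  | zero => simp [PySem.Chars.splitOn.go]
  | succ fuel ih =>
    cases l with
    | nil => simp [PySem.Chars.splitOn.go]
    | cons c rest =>
      rw [PySem.Chars.splitOn.go]
      split
      · have := ih (List.drop sep.length (c :: rest)) [] (cur.reverse :: acc)
        simp at this; omega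
      · exact ih rest (c :: cur) acc

-- go yields exactly acc.length + 1 pieces iff the separator does not occur in l
theorem go_length_eq_one (sep : List Char) (hsep : sep ≠ []) (fuel : Nat) (l cur : List Char)
    (acc : List (List Char)) (hfuel : l.length < fuel) :
    ((PySem.Chars.splitOn.go sep fuel l cur acc).length = acc.length + 1 ↔ ¬ sep <:+: l) := by
  induction fuel generalizing l cur acc with
  | zero => omega
  | succ fuel ih =>
    cases l with
    | nil =>
      simp [PySem.Chars.splitOn.go, List.infix_nil, hsep]
    | cons c rest =>
      rw [PySem.Chars.splitOn.go]
      split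
      · rename_i hpre
        have hinf : sep <:+: c :: rest :=
          (List.isPrefixOf_iff_prefix.mp hpre).isInfix
        have hge := go_length_ge sep fuel (List.drop sep.length (c :: rest)) [] (cur.reverse :: acc)
        simp at hge
        constructor
        · intro h; omega
        · intro h; exact absurd hinf h
      · rename_i hpre
        have hlen : rest.length < fuel := by simp at hfuel; omega
        rw [ih rest (c :: cur) acc hlen]
        have hnp : ¬ sep <+: c :: rest := fun h => hpre (List.isPrefixOf_iff_prefix.mpr h)
        rw [List.infix_cons_iff]
        tauto

-- Python's  len(s.split('.')) == 1  is  '.' not in s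
theorem splitOn_dot_length_eq_one (s : List Char) :
    (((PySem.Chars.splitOn s ['.']).length == 1) = true ↔ ¬ ['.'] <:+: s) := by
  rw [beq_iff_eq]
  simpa using go_length_eq_one ['.'] (by simp) (s.length + 1) s [] [] (by omega)

theorem isIn_dot_eq_false_iff (f : String) :
    PySem.Str.isIn "." f = false ↔ ¬ ['.'] <:+: f.toList := by
  rw [← Bool.not_eq_true, PySem.Str.isIn_iff_infix]
  exact Iff.rfl

-- both sides filter folders with this combined test
theorem filterA_eq_filterB (images_folders : List String) (s : String) :
    images_folders.filter (fun f =>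
        ((PySem.Chars.splitOn f.toList ['.']).length == 1) && PySem.Str.isIn s f)
      = images_folders.filter (fun f => !PySem.Str.isIn "." f && PySem.Str.isIn s f) := by
  apply List.filter_congr
  intro f _
  by_cases hdot : ['.'] <:+: f.toList
  · have h1 : ((PySem.Chars.splitOn f.toList ['.']).length == 1) = false := by
      rw [← Bool.not_eq_true, splitOn_dot_length_eq_one]; exact not_not_intro hdot
    have h2 : PySem.Str.isIn "." f = true := by
      rw [PySem.Str.isIn_iff_infix]; exact (by simpa using hdot)
    rw [h1, h2]; rfl
  · have h1 : ((PySem.Chars.splitOn f.toList ['.']).length == 1) = true :=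
      (splitOn_dot_length_eq_one f.toList).mpr hdot
    have h2 : PySem.Str.isIn "." f = false := (isIn_dot_eq_false_iff f).mpr hdot
    rw [h1, h2]; rfl

-- A computes the subject-major flatMap of the filtered folders
theorem find_subjects_eq_flatMap (images_folders subjects : List String) :
    find_subjects images_folders subjects
      = subjects.flatMap (fun s =>
          images_folders.filter (fun f => !PySem.Str.isIn "." f && PySem.Str.isIn s f)) := by
  have hinner : ∀ s ∈ subjects, ∀ (acc : List String),
      images_folders.foldl (fun acc images_folder =>
        if (PySem.Chars.splitOn images_folder.toList ['.']).length == 1 then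
          if PySem.Str.isIn s images_folder then acc ++ [images_folder] else acc
        else acc) acc
      = acc ++ images_folders.filter (fun f => !PySem.Str.isIn "." f && PySem.Str.isIn s f) := by
    intro s _ acc
    rw [← filterA_eq_filterB images_folders s,
        ← PySem.List.foldl_append_if_eq_filter
          (fun f => ((PySem.Chars.splitOn f.toList ['.']).length == 1) && PySem.Str.isIn s f) images_folders acc]
    apply PySem.List.foldl_congr_mem
    intro acc' f _
    by_cases h1 : ((PySem.Chars.splitOn f.toList ['.']).length == 1) = true
    · by_cases h2 : PySem.Str.isIn s f = true
      · rw [if_pos h1, if_pos h2, if_pos (by rw [h1, h2]; rfl)]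
      · rw [if_pos h1, if_neg h2, if_neg (by simp only [Bool.and_eq_true]; tauto)]
    · rw [if_neg h1, if_neg (by simp only [Bool.and_eq_true]; tauto)]
  unfold find_subjects
  rw [PySem.List.foldl_congr_mem' subjects _ _ [] hinner,
      PySem.List.foldl_append_eq_flatMap, List.nil_append]

-- inner subject loop of B: its effect on one key of the dict
theorem inner_getD (folder : String) (ds : List String) (hnd : ds.Nodup)
    (d : PySem.Dict String (List String)) (s : String) :
    (ds.foldl (fun d t =>
        if PySem.Str.isIn t folder then d.insert t ((d.getD t []) ++ [folder]) else d) d).getD s []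
      = if s ∈ ds ∧ PySem.Str.isIn s folder = true then d.getD s [] ++ [folder] else d.getD s [] := by
  induction ds generalizing d with
  | nil => simp
  | cons t rest ih =>
    rcases List.nodup_cons.mp hnd with ⟨hts, hr⟩
    rw [List.foldl_cons, ih hr]
    by_cases hst : s = t
    · subst hst
      rw [if_neg (by tauto)]
      by_cases hin : PySem.Str.isIn s folder = true
      · rw [if_pos hin, if_pos ⟨List.mem_cons_self, hin⟩, PySem.Dict.getD_insert_self]
      · rw [if_neg hin, if_neg (by tauto)]
    · have hiff : (s ∈ t :: rest ∧ PySem.Str.isIn s folder = true) ↔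
          (s ∈ rest ∧ PySem.Str.isIn s folder = true) := by
        simp [hst]
      rw [if_congr hiff rfl rfl]
      by_cases hin : PySem.Str.isIn t folder = true
      · rw [if_pos hin, PySem.Dict.getD_insert_of_ne _ _ _ hst]
      · rw [if_neg hin]

-- outer folder loop of B: the dict maps each distinct subject to its matching folders
theorem outer_getD (folders : List String) (ds : List String) (hnd : ds.Nodup)
    (d : PySem.Dict String (List String)) (s : String) (hs : s ∈ ds) :
    (folders.foldl (fun d folder =>
        if PySem.Str.isIn "." folder then d
        else ds.foldl (fun d t =>
          if PySem.Str.isIn t folder then d.insert t ((d.getD t []) ++ [folder]) else d) d) d).getD s []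
      = d.getD s [] ++ folders.filter (fun f => !PySem.Str.isIn "." f && PySem.Str.isIn s f) := by
  induction folders generalizing d with
  | nil => simp
  | cons folder rest ih =>
    rw [List.foldl_cons]
    by_cases hdot : PySem.Str.isIn "." folder = true
    · have hdotC : PySem.Chars.isIn ['.'] folder.toList = true := by simpa using hdot
      rw [if_pos hdot, ih d, List.filter_cons_of_neg (by simp [hdotC])]
    · have hdotC : PySem.Chars.isIn ['.'] folder.toList = false := by simpa using hdot
      rw [if_neg hdot, ih _, inner_getD folder ds hnd d s]
      by_cases hin : PySem.Str.isIn s folder = true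
      · have hinC : PySem.Chars.isIn s.toList folder.toList = true := by simpa using hin
        rw [if_pos ⟨hs, hin⟩, List.filter_cons_of_pos (by simp [hdotC, hinC]),
            List.append_assoc]
        rfl
      · have hinC : PySem.Chars.isIn s.toList folder.toList = false := by simpa using hin
        rw [if_neg (by tauto), List.filter_cons_of_neg (by simp [hinC])]

-- B computes the same flatMap
theorem find_subjects_alt_eq_flatMap (images_folders subjects : List String) :
    find_subjects_alt images_folders subjects
      = subjects.flatMap (fun s =>
          images_folders.filter (fun f => !PySem.Str.isIn "." f && PySem.Str.isIn s f)) := by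
  have hout : ∀ s ∈ subjects, ∀ (out : List String),
      out ++ (images_folders.foldl (fun d folder =>
          if PySem.Str.isIn "." folder then d
          else (PySem.List.dedup subjects).foldl (fun d subject =>
            if PySem.Str.isIn subject folder then
              d.insert subject ((d.getD subject []) ++ [folder])
            else d) d) PySem.Dict.empty).getD s []
      = out ++ images_folders.filter (fun f => !PySem.Str.isIn "." f && PySem.Str.isIn s f) := by
    intro s hsub out
    rw [outer_getD images_folders (PySem.List.dedup subjects) (PySem.List.nodup_dedup subjects)
          PySem.Dict.empty s (by rw [PySem.List.mem_dedup]; exact hsub)]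
    simp
  unfold find_subjects_alt
  dsimp only
  rw [PySem.List.foldl_congr_mem' subjects _ _ [] hout,
      PySem.List.foldl_append_eq_flatMap, List.nil_append]

-- ===== VERDICT (by name: the statement is the Claim_ definition above) =====
theorem find_subjects_spec : Claim_equal_find_subjects := by
  intro images_folders subjects _
  unfold Spec_find_subjects
  rw [find_subjects_eq_flatMap, find_subjects_alt_eq_flatMap]
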